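-- pv_equiv track=rewrite | github.com/NestorVil/PY110-Spot | py110_problems/48.py | joining_string
-- ===== SOURCE A (Python) =====
-- def joining_string(split_string):
--     retuning_list = []
--
--     new_string = ''
--
--     for idx, word in enumerate(split_string):
--         if idx % 2 == 0 :
--             new_string += word
--         elif idx % 2 == 1:
--             new_string += word
--             retuning_list.append(new_string)
--             new_string = ''
--
--         if idx == len(split_string) - 1 and len(split_string) % 2 == 1:
--             retuning_list.append(new_string)
--
--     return retuning_list
-- ===== SOURCE B (Python) =====
-- def joining_string(split_string):
--     return [''.join(split_string[i:i + 2]) for i in range(0, len(split_string), 2)]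
-- ===== Notes on version B (the rewrite author's own statement) =====
-- stated objective: simpler
-- what changed: Replaced the per-element parity-branch accumulation (with an explicit odd-tail check inside the loop) by a single comprehension stepping index by 2 and joining each slice of up to two elements.
import Mathlib
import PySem

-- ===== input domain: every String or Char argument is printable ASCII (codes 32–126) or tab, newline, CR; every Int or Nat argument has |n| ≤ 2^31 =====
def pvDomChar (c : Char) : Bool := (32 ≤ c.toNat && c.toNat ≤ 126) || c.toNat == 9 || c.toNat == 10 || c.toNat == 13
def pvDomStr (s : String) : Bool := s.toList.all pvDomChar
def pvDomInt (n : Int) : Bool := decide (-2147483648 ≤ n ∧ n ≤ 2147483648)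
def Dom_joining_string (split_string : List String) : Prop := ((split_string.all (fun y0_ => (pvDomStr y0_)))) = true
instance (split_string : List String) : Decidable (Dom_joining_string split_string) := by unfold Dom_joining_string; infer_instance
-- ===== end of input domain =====

-- B replaces A's per-element parity-branch accumulation by a stride-2 slice-and-join comprehension; objective: simpler.

-- ===== PORT A =====
-- A's loop body (n = len(split_string)); branches in A's order
def joiningStepA (n : Int) (st : List String × String) (iw : Int × String) :
    List String × String :=
  let retuning_list := st.1
  let new_string := st.2
  let (retuning_list, new_string) :=
    if PySem.Int.mod iw.1 2 == 0 then
      (retuning_list, new_string ++ iw.2)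
    else if PySem.Int.mod iw.1 2 == 1 then
      (retuning_list ++ [new_string ++ iw.2], "")
    else (retuning_list, new_string)
  if iw.1 == n - 1 && PySem.Int.mod n 2 == 1 then
    (retuning_list ++ [new_string], new_string)
  else (retuning_list, new_string)

-- literal transliteration of A: fold over enumerate(split_string) carrying (retuning_list, new_string)
def joining_string (split_string : List String) : List String :=
  ((PySem.List.enumerate split_string).foldl
    (joiningStepA (split_string.length : Int)) ([], "")).1

-- ===== PORT B =====
-- literal transliteration of B: [''.join(split_string[i:i+2]) for i in range(0, len(split_string), 2)]
def joining_string_alt (split_string : List String) : List String :=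
  (PySem.List.pyRange 0 (split_string.length : Int) 2).map
    (fun i => PySem.Str.join "" (PySem.List.slice split_string (some i) (some (i + 2))))

-- ===== PRECONDITION & SPEC =====
def Spec_joining_string (split_string : List String) (out : List String) : Prop := out = joining_string_alt split_string
instance (split_string : List String) (out : List String) : Decidable (Spec_joining_string split_string out) := by unfold Spec_joining_string; infer_instance

-- ===== CLAIM (what is proved, stated in full; the proofs are below) =====
def Claim_equal_joining_string : Prop := ∀ (split_string : List String), Dom_joining_string split_string → Spec_joining_string split_string (joining_string split_string)

-- ===== LEMMAS AND PROOFS =====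

/-- Common normal form: join consecutive pairs (odd tail kept alone). -/
def pairsJoin : List String → List String
  | [] => []
  | [a] => [a]
  | a :: b :: rest => (a ++ b) :: pairsJoin rest

theorem pyRange_two_nil (a b : Int) (h : b ≤ a) :
    PySem.List.pyRange a b 2 = [] := by
  rw [PySem.List.pyRange_of_pos a b (by norm_num)]
  rw [if_neg (by omega)]
  simp

theorem pyRange_two_cons (a b : Int) (h : a < b) :
    PySem.List.pyRange a b 2 = a :: PySem.List.pyRange (a + 2) b 2 := by
  rw [PySem.List.pyRange_of_pos a b (by norm_num),
      PySem.List.pyRange_of_pos (a + 2) b (by norm_num)]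
  have hc : ((b - a + 2 - 1) / 2).toNat
      = (if a + 2 < b then ((b - (a + 2) + 2 - 1) / 2).toNat else 0) + 1 := by
    split_ifs <;> omega
  rw [if_pos h, hc, List.range_succ_eq_map]
  simp only [List.map_cons, List.map_map]
  congr 1
  · norm_num
  · apply List.map_congr_left
    intro k _
    simp [Function.comp]
    ring

/-- A's loop, characterised: starting at an even index `idx` with `idx + |xs| = n`,
the fold over the remaining enumerated words appends `pairsJoin` of the rest
(prefixed by the pending accumulator on the first pair / odd tail). -/
def pairsFrom : String → List String → List String
  | _, [] => []
  | cur, [a] => [cur ++ a]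
  | cur, a :: b :: rest => (cur ++ a ++ b) :: pairsFrom "" rest

theorem pymod_two (x : Int) : PySem.Int.mod x 2 = x % 2 := by
  simp [PySem.Int.mod, Int.fmod_eq_emod]

theorem stepA_even {n idx : Int} (ret : List String) (cur a : String)
    (h : idx % 2 = 0) :
    joiningStepA n (ret, cur) (idx, a)
      = if idx = n - 1 then (ret ++ [cur ++ a], cur ++ a) else (ret, cur ++ a) := by
  unfold joiningStepA
  simp only [pymod_two, h, beq_iff_eq]
  by_cases hl : idx = n - 1
  · have hn : n % 2 = 1 := by omega
    simp [hl, hn]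
  · simp [hl]

theorem stepA_odd {n idx : Int} (ret : List String) (cur b : String)
    (h : idx % 2 = 1) :
    joiningStepA n (ret, cur) (idx, b) = (ret ++ [cur ++ b], "") := by
  unfold joiningStepA
  have h0 : ¬ (idx % 2 = 0) := by omega
  by_cases hl : idx = n - 1
  · have hn : ¬ (n % 2 = 1) := by omega
    have hm : (n - 1) % 2 = 1 := by omega
    simp [hl, hn, hm]
  · simp [h, hl]

theorem foldA (n : Int) :
    ∀ (xs : List String) (idx : Int) (ret : List String) (cur : String),
      idx + xs.length = n → idx % 2 = 0 →
      ((PySem.List.enumerate xs idx).foldl (joiningStepA n) (ret, cur)).1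
        = ret ++ pairsFrom cur xs
  | [], idx, ret, cur, h, he => by
    simp [PySem.List.enumerate, pairsFrom]
  | [a], idx, ret, cur, h, he => by
    simp only [List.length_cons, List.length_nil] at h
    have h1 : idx = n - 1 := by omega
    simp only [PySem.List.enumerate, List.foldl_cons, List.foldl_nil,
      stepA_even ret cur a he, if_pos h1]
    simp [pairsFrom]
  | a :: b :: rest, idx, ret, cur, h, he => by
    simp only [List.length_cons] at h
    have h4 : ¬ (idx = n - 1) := by omega
    have ih := foldA n rest (idx + 2) (ret ++ [cur ++ a ++ b]) ""
      (by push_cast at h; omega) (by omega)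
    simp only [PySem.List.enumerate, List.foldl_cons,
      stepA_even (n := n) ret cur a he, if_neg h4,
      stepA_odd (n := n) (idx := idx + 1) ret (cur ++ a) b (by omega)]
    rw [show idx + 1 + 1 = idx + 2 by ring, ih]
    simp [pairsFrom]

theorem joining_string_eq_pairsFrom (xs : List String) :
    joining_string xs = pairsFrom "" xs := by
  unfold joining_string
  have := foldA (xs.length : Int) xs 0 [] "" (by omega) (by omega)
  simpa using this

theorem pairsFrom_empty_eq_pairsJoin : ∀ xs, pairsFrom "" xs = pairsJoin xs
  | [] => by simp [pairsFrom, pairsJoin]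
  | [a] => by simp [pairsFrom, pairsJoin]
  | a :: b :: rest => by
    simp [pairsFrom, pairsJoin, pairsFrom_empty_eq_pairsJoin rest]

theorem join_empty_pair (a b : String) :
    PySem.Str.join "" [a, b] = a ++ b := by
  apply String.ext
  simp [PySem.Str.join, PySem.Chars.join, List.intercalate]

theorem join_empty_single (a : String) :
    PySem.Str.join "" [a] = a := by
  apply String.ext
  simp [PySem.Str.join, PySem.Chars.join, List.intercalate]

theorem foldB (full : List String) :
    ∀ (i : Int), 0 ≤ i →
      (PySem.List.pyRange i (full.length : Int) 2).map
        (fun j => PySem.Str.join "" (PySem.List.slice full (some j) (some (j + 2))))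
      = pairsJoin (full.drop i.toNat) := by
  intro i hi
  rcases hd : full.drop i.toNat with _ | ⟨a, t⟩
  case nil =>
    have hlen : (full.length : Int) ≤ i := by
      have := List.drop_eq_nil_iff.mp hd
      omega
    rw [pyRange_two_nil _ _ hlen]
    simp [pairsJoin]
  case cons =>
    have hlt : i < (full.length : Int) := by
      have hlen := congrArg List.length hd
      simp at hlen
      omega
    rw [pyRange_two_cons _ _ hlt]
    have hslice : PySem.List.slice full (some i) (some (i + 2))
        = (full.drop i.toNat).take 2 := by
      rw [PySem.List.slice_toNat full hi (by omega)]
      congr 1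
      omega
    rcases ht : t with _ | ⟨b, t'⟩
    case nil =>
      have hlen2 : full.length = i.toNat + 1 := by
        have hlen := congrArg List.length hd
        simp [ht] at hlen
        omega
      have hnil : (full.length : Int) ≤ i + 2 := by omega
      rw [pyRange_two_nil _ _ hnil]
      simp only [List.map_cons, List.map_nil, hslice, hd, ht]
      simp [pairsJoin, join_empty_single]
    case cons =>
      have ih := foldB full (i + 2) (by omega)
      have hdrop : full.drop (i + 2).toNat = t' := by
        have : (i + 2).toNat = i.toNat + 2 := by omega
        rw [this, show i.toNat + 2 = i.toNat + 1 + 1 by ring]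
        rw [← List.drop_drop, ← List.drop_drop, hd, ht]
        simp
      rw [List.map_cons, ih, hdrop, hslice, hd, ht]
      simp [pairsJoin, join_empty_pair]
termination_by i => full.length - i.toNat
decreasing_by
  have hlen := congrArg List.length hd
  simp at hlen
  omega

theorem joining_string_alt_eq_pairsJoin (xs : List String) :
    joining_string_alt xs = pairsJoin xs := by
  unfold joining_string_alt
  have := foldB xs 0 (by omega)
  simpa using this

-- ===== VERDICT (by name: the statement is the Claim_ definition above) =====
theorem joining_string_spec : Claim_equal_joining_string := by
  intro xs _
  unfold Spec_joining_string
  rw [joining_string_eq_pairsFrom, pairsFrom_empty_eq_pairsJoin,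
    joining_string_alt_eq_pairsJoin]
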